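-- pv_equiv track=rewrite | github.com/heyoon2j/y2-devops-lab | codingTest/Starter/day20.py | solution
-- ===== SOURCE A (Python) =====
-- def solution(polynomial):
--     answer = [0, 0]
--     values = polynomial.split()
--
--     for i in values:
--         if i == "+":
--             continue
--
--         if i == "x":
--             answer[0] += 1
--         elif "x" in i:
--             i = i.replace("x", "")
--             answer[0] += int(i)
--         else:
--             answer[1] += int(i)
--
--
--     if answer[0] == 0:
--         return str(answer[1])
--     elif answer[1] == 0:
--         return (str(answer[0]) + "x") if (answer[0] != 1) else ("x")
--     else:
--         result = (str(answer[0]) + "x") if (answer[0] != 1) else ("x")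
--         return result +" + " + str(answer[1])
-- ===== SOURCE B (Python) =====
-- def solution(polynomial):
--     coeff = 0
--     const = 0
--     num = 0
--     neg = False
--     digits = False
--     sawx = False
--     for c in polynomial + " ":
--         if c.isspace():
--             if sawx:
--                 coeff += (-num if neg else num) if digits else 1
--             elif digits:
--                 const += -num if neg else num
--             num, neg, digits, sawx = 0, False, False, False
--         elif c.isdigit():
--             num = num * 10 + (ord(c) - 48)
--             digits = True
--         elif c == 'x':
--             sawx = True
--         elif c == '-':
--             neg = True
--     parts = []
--     if coeff != 0:
--         parts.append("x" if coeff == 1 else str(coeff) + "x")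
--     if const != 0 or not parts:
--         parts.append(str(const))
--     return " + ".join(parts)
-- ===== Notes on version B (the rewrite author's own statement) =====
-- stated objective: alternative
-- what changed: Replaces A's split()/int()/replace() token pipeline with a single character-level state machine (digit accumulator, sign/digit/x flags, flush on whitespace over polynomial + ' ') and a collect-parts-then-join formatter; B never calls split, int or replace.
import Mathlib
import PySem

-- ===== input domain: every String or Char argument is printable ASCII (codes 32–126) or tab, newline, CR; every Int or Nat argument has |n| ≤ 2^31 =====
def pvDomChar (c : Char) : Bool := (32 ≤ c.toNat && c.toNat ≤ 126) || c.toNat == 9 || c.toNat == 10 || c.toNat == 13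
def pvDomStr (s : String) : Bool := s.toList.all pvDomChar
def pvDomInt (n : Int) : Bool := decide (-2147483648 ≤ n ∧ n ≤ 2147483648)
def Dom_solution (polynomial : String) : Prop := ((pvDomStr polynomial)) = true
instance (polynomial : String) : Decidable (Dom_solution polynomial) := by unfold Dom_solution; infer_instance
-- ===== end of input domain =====

-- B replaces A's split()/int()/replace() token pipeline by a single character-level
-- state machine (sign/digit-accumulator/x-flag with flush on whitespace) and a
-- collect-parts-then-join formatter (objective: alternative).


-- ===== PORT A =====
-- the loop body of A (one token of the 'for i in values' loop)
def solutionStep (a : Int × Int) (i : String) : Int × Int :=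
  if i == "+" then a
  else if i == "x" then (a.1 + 1, a.2)
  else if PySem.Str.isIn "x" i then
    (a.1 + (PySem.Int.ofStr? (PySem.Str.replace i "x" "")).getD 0, a.2)   -- int() ValueError ⇒ excluded by Pre_
  else (a.1, a.2 + (PySem.Int.ofStr? i).getD 0)                           -- int() ValueError ⇒ excluded by Pre_

def solution (polynomial : String) : String :=
  let values := PySem.Str.split₀ polynomial
  let answer : Int × Int := values.foldl solutionStep (0, 0)
  if answer.1 == 0 then PySem.Int.toStr answer.2
  else if answer.2 == 0 then (if answer.1 != 1 then PySem.Int.toStr answer.1 ++ "x" else "x")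
  else
    (if answer.1 != 1 then PySem.Int.toStr answer.1 ++ "x" else "x") ++ " + " ++ PySem.Int.toStr answer.2

-- ===== PORT B =====
-- the loop body of B (one character of the 'for c in polynomial + " "' loop);
-- state = ((coeff, const), (num, neg, digits, sawx))
def bStep (st : (Int × Int) × (Int × Bool × Bool × Bool)) (c : Char) :
    (Int × Int) × (Int × Bool × Bool × Bool) :=
  let coeff := st.1.1; let const := st.1.2
  let num := st.2.1; let neg := st.2.2.1; let digits := st.2.2.2.1; let sawx := st.2.2.2.2
  if PySem.Chars.isspace c then
    (( if sawx then (coeff + (if digits then (if neg then -num else num) else 1), const)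
       else if digits then (coeff, const + (if neg then -num else num))
       else (coeff, const) ),
     (0, false, false, false))
  else if PySem.Chars.isdigit c then ((coeff, const), (num * 10 + ((c.toNat : Int) - 48), neg, true, sawx))
  else if c = 'x' then ((coeff, const), (num, neg, digits, true))
  else if c = '-' then ((coeff, const), (num, true, digits, sawx))
  else st

def solution_alt (polynomial : String) : String :=
  -- 'for c in polynomial + " "' ported on the char list (PySem string ops are List Char based)
  let fin := (polynomial.toList ++ [' ']).foldl bStep ((0, 0), (0, false, false, false))
  let coeff := fin.1.1
  let const := fin.1.2
  let parts : List String := if coeff ≠ 0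
      then [if coeff == 1 then "x" else PySem.Int.toStr coeff ++ "x"] else []
  let parts := if const ≠ 0 || parts.isEmpty then parts ++ [PySem.Int.toStr const] else parts
  PySem.Str.join " + " parts

-- ===== PRECONDITION & SPEC =====
-- decimal reading of a token's digit characters with its sign: what Python's int()
-- returns whenever it succeeds on such a token
def tokVal (cs : List Char) : Int :=
  (if '-' ∈ cs then -1 else 1) *
    (cs.filter PySem.Chars.isdigit).foldl (fun n d => 10 * n + ((d.toNat : Int) - 48)) 0

-- a token A accepts: a plus sign, the bare variable, or an int() numeral after the
-- variable letters are deleted; the pinned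
-- value 'some (tokVal …)' is the decimal reading of its digits, which is exactly what
-- int() returns whenever it succeeds, so the equation holds iff int() does not raise
def Ptok (t : String) : Prop :=
  t = "+" ∨ t = "x" ∨
  (t.toList.any PySem.Chars.isdigit = true ∧
   (if PySem.Str.isIn "x" t = true
    then PySem.Int.ofStr? (PySem.Str.replace t "x" "")
           = some (tokVal (t.toList.filter (fun c => c ≠ 'x')))
    else PySem.Int.ofStr? t = some (tokVal t.toList)))

-- Pre_ excludes exactly the inputs on which Python A raises ValueError: some
-- whitespace-separated token, other than a bare plus sign or a bare variable letter,
-- fails int() after its variable letters are deleted.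
def Pre_solution (polynomial : String) : Prop :=
  ∀ t ∈ PySem.Str.split₀ polynomial, Ptok t
instance (polynomial : String) : Decidable (Pre_solution polynomial) := by
  unfold Pre_solution Ptok; infer_instance
def pvWitness_solution : String := "3x + 7 + x + -2"
def Spec_solution (polynomial : String) (out : String) : Prop := out = solution_alt polynomial
instance (polynomial : String) (out : String) : Decidable (Spec_solution polynomial out) := by unfold Spec_solution; infer_instance

-- ===== CLAIM (what is proved, stated in full; the proofs are below) =====
def Claim_equal_solution : Prop := ∀ (polynomial : String), Dom_solution polynomial → Pre_solution polynomial → Spec_solution polynomial (solution polynomial)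

-- ===== LEMMAS AND PROOFS =====

-- closed form of B's token-scan state after reading the space-free chars w
def scanTS (w : List Char) : Int × Bool × Bool × Bool :=
  ((w.filter PySem.Chars.isdigit).foldl (fun n d => 10 * n + ((d.toNat : Int) - 48)) 0,
   decide ('-' ∈ w), w.any PySem.Chars.isdigit, decide ('x' ∈ w))

-- B's flush of a token state into (coeff, const)
def contrib (cc : Int × Int) (ts : Int × Bool × Bool × Bool) : Int × Int :=
  if ts.2.2.2 then (cc.1 + (if ts.2.2.1 then (if ts.2.1 then -ts.1 else ts.1) else 1), cc.2)
  else if ts.2.2.1 then (cc.1, cc.2 + (if ts.2.1 then -ts.1 else ts.1))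
  else cc

theorem bStep_space (cc : Int × Int) (ts : Int × Bool × Bool × Bool) (c : Char)
    (hc : PySem.Chars.isspace c = true) :
    bStep (cc, ts) c = (contrib cc ts, (0, false, false, false)) := by
  simp [bStep, contrib, hc]

theorem bStep_nonspace (cc : Int × Int) (w : List Char) (c : Char)
    (hc : PySem.Chars.isspace c = false) :
    bStep (cc, scanTS w) c = (cc, scanTS (w ++ [c])) := by
  by_cases hd : PySem.Chars.isdigit c = true
  · have hx' : ¬('x' = c) := by rintro rfl; simp [PySem.Chars.isdigit] at hd
    have hm' : ¬('-' = c) := by rintro rfl; simp [PySem.Chars.isdigit] at hd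
    simp [bStep, scanTS, hc, hd, List.filter_append, List.any_append, hx', hm',
      List.mem_append, or_comm, mul_comm]
  · simp only [Bool.not_eq_true] at hd
    by_cases hx : c = 'x'
    · subst hx
      simp [bStep, scanTS, hc, hd, List.filter_append, List.any_append, List.mem_append]
    · by_cases hm : c = '-'
      · subst hm
        simp [bStep, scanTS, hc, hd, List.filter_append, List.any_append, List.mem_append, hx]
      · have hx' : ¬('x' = c) := fun h => hx h.symm
        have hm' : ¬('-' = c) := fun h => hm h.symm
        simp [bStep, scanTS, hc, hd, hx, hm, hx', hm', List.filter_append, List.any_append,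
          List.mem_append]

theorem singleton_infix_iff (c : Char) (t : List Char) : [c] <:+: t ↔ c ∈ t := by
  constructor
  · intro ⟨l, r, h⟩; subst h; simp
  · intro h; obtain ⟨l, r, rfl⟩ := List.mem_iff_append.mp h
    exact ⟨l, r, by simp⟩

theorem isIn_x_eq (t : List Char) :
    PySem.Str.isIn "x" (String.ofList t) = decide ('x' ∈ t) := by
  by_cases h : 'x' ∈ t
  · simp [h]
    rw [PySem.Chars.isIn_iff_infix]
    exact (singleton_infix_iff _ _).mpr h
  · simp [h]
    rw [PySem.Chars.isIn_eq_false_iff]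
    exact fun hin => h ((singleton_infix_iff _ _).mp hin)

theorem filter_digit_filter_ne_x (t : List Char) :
    (t.filter (fun c => c ≠ 'x')).filter PySem.Chars.isdigit = t.filter PySem.Chars.isdigit := by
  rw [List.filter_filter]
  apply List.filter_congr
  intro a _
  by_cases hx : a = 'x'
  · subst hx; decide
  · simp [hx]

-- per-token agreement: B's flush of a scanned token equals A's loop body on it
theorem contrib_eq_solutionStep (t : List Char) (cc : Int × Int)
    (hne : t ≠ [])
    (hp : Ptok (String.ofList t)) :
    contrib cc (scanTS t) = solutionStep cc (String.ofList t) := by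
  rcases hp with h | h | ⟨hd, hpin⟩
  · have ht : t = ['+'] := by have := congrArg String.toList h; simpa using this
    subst ht
    simp [contrib, scanTS, solutionStep, h, show PySem.Chars.isdigit '+' = false from rfl]
  · have ht : t = ['x'] := by have := congrArg String.toList h; simpa using this
    subst ht
    simp [contrib, scanTS, solutionStep, h, show PySem.Chars.isdigit 'x' = false from rfl]
  · have hd' : t.any PySem.Chars.isdigit = true := by simpa using hd
    have hplus : ¬(String.ofList t = "+") := by
      intro h
      have ht : t = ['+'] := by have := congrArg String.toList h; simpa using this
      rw [ht] at hd'; simp [PySem.Chars.isdigit] at hd'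
    have hxs : ¬(String.ofList t = "x") := by
      intro h
      have ht : t = ['x'] := by have := congrArg String.toList h; simpa using this
      rw [ht] at hd'; simp [PySem.Chars.isdigit] at hd'
    by_cases hx : 'x' ∈ t
    · have hin : PySem.Str.isIn "x" (String.ofList t) = true := by
        rw [isIn_x_eq]; simpa using hx
      rw [hin, if_pos rfl] at hpin
      simp only [String.toList_ofList] at hpin
      simp only [solutionStep, beq_iff_eq, hplus, hxs, if_false, hin, hpin,
        Option.getD_some]
      simp only [contrib, scanTS, hd', hx, decide_true]
      rw [tokVal, filter_digit_filter_ne_x]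
      by_cases hneg : '-' ∈ t
      · simp [hneg]
      · simp [hneg]
    · have hin : PySem.Str.isIn "x" (String.ofList t) = false := by
        rw [isIn_x_eq]; simpa using hx
      rw [hin] at hpin
      simp only [Bool.false_eq_true, if_false] at hpin
      simp only [String.toList_ofList] at hpin
      simp only [solutionStep, beq_iff_eq, hplus, hxs, if_false, hin, Bool.false_eq_true,
        hpin, Option.getD_some]
      simp only [contrib, scanTS, hd', hx, decide_false, Bool.false_eq_true, if_false]
      rw [tokVal]
      by_cases hneg : '-' ∈ t
      · simp [hneg]
      · simp [hneg]

-- split₀.go accumulator append law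
theorem split₀_go_acc (cs : List Char) (cur : List Char) (acc : List (List Char)) :
    PySem.Chars.split₀.go cs cur acc = acc.reverse ++ PySem.Chars.split₀.go cs cur [] := by
  induction cs generalizing cur acc with
  | nil =>
    unfold PySem.Chars.split₀.go
    by_cases h : cur.isEmpty
    · simp [h]
    · simp [h]
  | cons c rest ih =>
    unfold PySem.Chars.split₀.go
    by_cases hsp : PySem.Chars.isspace c
    · by_cases h : cur.isEmpty
      · simp only [hsp, h, if_pos]
        exact ih [] acc
      · simp only [hsp, h, Bool.false_eq_true, if_true, if_false]
        rw [ih [] (cur.reverse :: acc), ih [] [cur.reverse]]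
        simp
    · simp only [hsp, Bool.false_eq_true, if_false]
      exact ih (c :: cur) acc

-- the main loop correspondence: B's char fold over the rest of the input (plus the
-- sentinel space) equals A's token fold over the tokens split₀.go still produces
theorem main_loop (cs : List Char) : ∀ (cur : List Char) (cc : Int × Int),
    (∀ c ∈ cur, PySem.Chars.isspace c = false) →
    (∀ t ∈ PySem.Chars.split₀.go cs cur [], Ptok (String.ofList t)) →
    ((cs ++ [' ']).foldl bStep (cc, scanTS cur.reverse)).1
      = ((PySem.Chars.split₀.go cs cur []).map String.ofList).foldl solutionStep cc := by
  induction cs with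
  | nil =>
    intro cur cc hcur hp
    rw [List.nil_append]
    simp only [List.foldl_cons, List.foldl_nil]
    rw [bStep_space _ _ _ (by decide)]
    unfold PySem.Chars.split₀.go at hp ⊢
    by_cases h : cur = []
    · subst h; simp [contrib, scanTS]
    · have hE : cur.isEmpty = false := by simpa [List.isEmpty_iff] using h
      simp only [hE, Bool.false_eq_true, if_false] at hp ⊢
      simp only [List.reverse_cons, List.reverse_nil, List.nil_append, List.map_cons,
        List.map_nil, List.foldl_cons, List.foldl_nil]
      exact contrib_eq_solutionStep cur.reverse cc (by simpa using h)
        (hp cur.reverse (by simp))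
  | cons c rest ih =>
    intro cur cc hcur hp
    rw [List.cons_append]
    simp only [List.foldl_cons]
    by_cases hsp : PySem.Chars.isspace c = true
    · rw [bStep_space _ _ _ hsp]
      unfold PySem.Chars.split₀.go at hp ⊢
      by_cases h : cur = []
      · subst h
        simp only [List.isEmpty_nil, hsp, if_true] at hp ⊢
        have h0 : contrib cc (scanTS ([] : List Char).reverse) = cc := by
          simp [contrib, scanTS]
        rw [show ((0 : Int), false, false, false) = scanTS (([] : List Char)).reverse from rfl]
        rw [h0]
        exact ih [] cc (by simp) hp
      · have hE : cur.isEmpty = false := by simpa [List.isEmpty_iff] using h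
        simp only [hsp, hE, Bool.false_eq_true, if_true, if_false] at hp ⊢
        rw [split₀_go_acc rest [] [cur.reverse]] at hp ⊢
        simp only [List.reverse_cons, List.reverse_nil, List.nil_append] at hp ⊢
        have hflush : contrib cc (scanTS cur.reverse) =
            solutionStep cc (String.ofList cur.reverse) :=
          contrib_eq_solutionStep cur.reverse cc (by simpa using h)
            (hp cur.reverse (by simp))
        rw [hflush]
        rw [show ((0 : Int), false, false, false) = scanTS (([] : List Char)).reverse from rfl]
        rw [ih [] (solutionStep cc (String.ofList cur.reverse)) (by simp)
          (fun t ht => hp t (List.mem_cons_of_mem _ ht))]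
        simp
    · have hsp' : PySem.Chars.isspace c = false := by simpa using hsp
      rw [bStep_nonspace _ _ _ hsp']
      rw [show cur.reverse ++ [c] = ((c :: cur).reverse) from by simp]
      unfold PySem.Chars.split₀.go at hp ⊢
      simp only [hsp', Bool.false_eq_true, if_false] at hp ⊢
      exact ih (c :: cur) cc
        (by intro d hd; rcases List.mem_cons.mp hd with rfl | hd
            · exact hsp'
            · exact hcur d hd) hp

theorem join_singleton_str (s : String) : PySem.Str.join " + " [s] = s := by
  simp [PySem.Str.join, PySem.Chars.join_singleton]

theorem join_pair_str (s t : String) :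
    PySem.Str.join " + " [s, t] = s ++ " + " ++ t := by
  simp [PySem.Str.join, PySem.Chars.join_cons_cons, PySem.Chars.join_singleton]
  rw [show (' ' :: '+' :: ' ' :: t.toList) = " + ".toList ++ t.toList from rfl,
      String.ofList_append]
  simp [String.append_assoc]

-- ===== VERDICT (by name: the statement is the Claim_ definition above) =====
theorem solution_spec : Claim_equal_solution := by
  intro poly _ hpre
  unfold Spec_solution solution solution_alt
  have hs : PySem.Str.split₀ poly = (PySem.Chars.split₀ poly.toList).map String.ofList := by
    rw [← PySem.Str.split₀_map_toList, List.map_map]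
    simp [Function.comp_def, String.ofList_toList]
  have hp : ∀ t ∈ PySem.Chars.split₀.go poly.toList [] [], Ptok (String.ofList t) := by
    intro t ht
    apply hpre
    rw [hs]
    exact List.mem_map_of_mem (by rw [PySem.Chars.split₀] at *; exact ht)
  have hmain := main_loop poly.toList [] (0, 0) (by simp) hp
  simp only [List.reverse_nil] at hmain
  rw [show ((((0 : Int), (0 : Int)), ((0 : Int), false, false, false))
        = (((0 : Int), (0 : Int)), scanTS [])) from rfl]
  rw [hs, PySem.Chars.split₀]
  simp only [hmain]
  set a := ((PySem.Chars.split₀.go poly.toList [] []).map String.ofList).foldl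
      solutionStep (0, 0) with ha
  by_cases h1 : a.1 = 0
  · simp [h1, join_singleton_str]
  · by_cases h2 : a.2 = 0
    · simp [h1, h2, join_singleton_str]
    · simp [h1, h2, join_pair_str]
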